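-- pv_equiv track=rewrite | github.com/PATILYASHH/NOVA-AI | core/self_improve.py | _identify_target_module
-- ===== SOURCE A (Python) =====
-- from typing import Dict, List, Optional, Tuple
--
-- def _identify_target_module(error_type: str, data: Dict) -> str:
--     """Identify which module needs fixing"""
--     triggers = data.get("triggers", [])
--     trigger_str = " ".join(str(t) for t in triggers).lower()
--
--     if "file" in trigger_str or "cat" in trigger_str or "ls" in trigger_str:
--         return "actions/file_ops.py"
--     elif "git" in trigger_str:
--         return "actions/code_handler.py"
--     elif "open" in trigger_str or "close" in trigger_str:
--         return "actions/system_control.py"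
--     elif "network" in trigger_str or "wifi" in trigger_str:
--         return "actions/advanced_control.py"
--     return "telegram_bot.py"
-- ===== SOURCE B (Python) =====
-- KEYWORD_PRIORITY = [
--     ("file", 0), ("cat", 0), ("ls", 0),
--     ("git", 1),
--     ("open", 2), ("close", 2),
--     ("network", 3), ("wifi", 3),
-- ]
--
-- MODULES = [
--     "actions/file_ops.py",
--     "actions/code_handler.py",
--     "actions/system_control.py",
--     "actions/advanced_control.py",
--     "telegram_bot.py",
-- ]
--
--
-- def _token_priority(tok: str) -> int:
--     for kw, p in KEYWORD_PRIORITY: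
--         if kw in tok:
--             return p
--     return 4
--
--
-- def _identify_target_module(error_type: str, data) -> str:
--     """Identify which module needs fixing (per-token scoring + running minimum)."""
--     best = 4
--     for t in data.get("triggers", []):
--         p = _token_priority(str(t).lower())
--         if p < best:
--             best = p
--     return MODULES[best]
-- ===== Notes on version B (the rewrite author's own statement) =====
-- stated objective: alternative
-- what changed: Instead of joining all triggers into one haystack and walking an if/elif precedence chain, B scores each lowered trigger with a numeric priority (first matching keyword) and keeps a running minimum over the tokens, finishing with an indexed table lookup; equivalent because no keyword contains a space, so a substring match in the joined string is a match inside a single token, and the minimal matched priority equals the first branch of A's chain that fires.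
import Mathlib
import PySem

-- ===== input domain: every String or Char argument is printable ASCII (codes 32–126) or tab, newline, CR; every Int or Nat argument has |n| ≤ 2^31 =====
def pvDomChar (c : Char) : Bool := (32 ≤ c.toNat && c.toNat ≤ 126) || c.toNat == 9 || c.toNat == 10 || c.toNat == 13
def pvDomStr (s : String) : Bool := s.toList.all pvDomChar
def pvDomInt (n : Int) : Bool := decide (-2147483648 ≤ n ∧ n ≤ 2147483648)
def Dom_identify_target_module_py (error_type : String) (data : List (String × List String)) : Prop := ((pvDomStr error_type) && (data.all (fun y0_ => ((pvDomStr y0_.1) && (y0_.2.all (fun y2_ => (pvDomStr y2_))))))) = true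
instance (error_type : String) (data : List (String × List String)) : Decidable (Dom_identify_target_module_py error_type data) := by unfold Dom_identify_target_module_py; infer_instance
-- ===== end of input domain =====

-- B replaces A's joined-haystack if/elif precedence chain by per-token numeric
-- priority scoring with a running minimum and an indexed module table (alternative
-- decomposition, same cost); return values are identical.

-- ===== PORT A =====
def identify_target_module_py (error_type : String) (data : List (String × List String)) : String :=
  let triggers := PySem.Dict.getD (PySem.Dict.mk data) "triggers" []
  let trigger_str := PySem.Str.lower (PySem.Str.join " " triggers)  -- str(t) is t itself (triggers are strings)
  if PySem.Str.isIn "file" trigger_str || PySem.Str.isIn "cat" trigger_str || PySem.Str.isIn "ls" trigger_str then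
    "actions/file_ops.py"
  else if PySem.Str.isIn "git" trigger_str then
    "actions/code_handler.py"
  else if PySem.Str.isIn "open" trigger_str || PySem.Str.isIn "close" trigger_str then
    "actions/system_control.py"
  else if PySem.Str.isIn "network" trigger_str || PySem.Str.isIn "wifi" trigger_str then
    "actions/advanced_control.py"
  else
    "telegram_bot.py"

-- ===== PORT B =====
def pvKwPrio : List (String × Nat) :=
  [ ("file", 0), ("cat", 0), ("ls", 0)
  , ("git", 1)
  , ("open", 2), ("close", 2)
  , ("network", 3), ("wifi", 3) ]

def pvModules : List String :=
  [ "actions/file_ops.py"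
  , "actions/code_handler.py"
  , "actions/system_control.py"
  , "actions/advanced_control.py"
  , "telegram_bot.py" ]

def pvTokenPriority (tok : String) : List (String × Nat) → Nat
  | [] => 4
  | (kw, p) :: rest => if PySem.Str.isIn kw tok then p else pvTokenPriority tok rest

def identify_target_module_py_alt (error_type : String) (data : List (String × List String)) : String :=
  let triggers := PySem.Dict.getD (PySem.Dict.mk data) "triggers" []
  let best := triggers.foldl
    (fun best t =>
      let p := pvTokenPriority (PySem.Str.lower t) pvKwPrio
      if p < best then p else best) 4
  pvModules.getD best ""   -- MODULES[best]; best ≤ 4 always, so the index is in range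

-- ===== PRECONDITION & SPEC =====
def Spec_identify_target_module_py (error_type : String) (data : List (String × List String)) (out : String) : Prop := out = identify_target_module_py_alt error_type data
instance (error_type : String) (data : List (String × List String)) (out : String) : Decidable (Spec_identify_target_module_py error_type data out) := by unfold Spec_identify_target_module_py; infer_instance

-- ===== CLAIM (what is proved, stated in full; the proofs are below) =====
def Claim_equal_identify_target_module_py : Prop := ∀ (error_type : String) (data : List (String × List String)), Dom_identify_target_module_py error_type data → Spec_identify_target_module_py error_type data (identify_target_module_py error_type data)

-- ===== LEMMAS AND PROOFS =====

-- A prefix that contains no space stops before an appended " " separator.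
lemma prefix_no_space (kw x b : List Char) (hsp : ' ' ∉ kw)
    (h : kw <+: x ++ ' ' :: b) : kw <+: x := by
  have hlen : kw.length ≤ x.length := by
    by_contra hl
    have hx : x.length < kw.length := by omega
    have hg := h.getElem hx
    have hval : (x ++ ' ' :: b)[x.length]'(by simp) = ' ' := by
      rw [List.getElem_append_right (le_refl x.length)]
      simp
    exact hsp ((hg.trans hval) ▸ List.getElem_mem hx)
  exact List.prefix_of_prefix_length_le h (List.prefix_append x (' ' :: b)) hlen

-- A space-free nonempty pattern is an infix of `a ++ ' ' :: b` iff it is an infix of a part.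
lemma infix_append_space (kw : List Char) (h0 : kw ≠ []) (hsp : ' ' ∉ kw) :
    ∀ (a b : List Char), (kw <:+: a ++ ' ' :: b ↔ kw <:+: a ∨ kw <:+: b) := by
  intro a
  induction a with
  | nil =>
    intro b
    constructor
    · intro h
      rcases List.infix_cons_iff.mp h with hpre | hinf
      · rcases hpre with ⟨t, ht⟩
        cases kw with
        | nil => exact absurd rfl h0
        | cons c cs =>
          have : c = ' ' := by simpa using congrArg (fun l => l.head?) ht
          exact absurd (this ▸ List.mem_cons_self) hsp
      · exact Or.inr hinf
    · rintro (h | h)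
      · rcases h with ⟨s, t, hst⟩
        simp at hst
        simp [hst.2.1] at h0
      · exact h.trans (List.suffix_cons ' ' b).isInfix
  | cons c a' ih =>
    intro b
    constructor
    · intro h
      rcases List.infix_cons_iff.mp h with hpre | hinf
      · have : kw <+: c :: a' := prefix_no_space kw (c :: a') b hsp (by simpa using hpre)
        exact Or.inl this.isInfix
      · rcases (ih b).mp hinf with h1 | h2
        · exact Or.inl (h1.trans (List.suffix_cons c a').isInfix)
        · exact Or.inr h2
    · rintro (h | h)
      · rcases h with ⟨s, t, hst⟩
        exact ⟨s, t ++ ' ' :: b, by rw [← hst]; simp⟩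
      · have : kw <:+: a' ++ ' ' :: b := (ih b).mpr (Or.inr h)
        exact this.trans (List.suffix_cons c (a' ++ ' ' :: b)).isInfix

-- Membership of a space-free nonempty pattern in a " "-joined list = membership in some part.
lemma isIn_join_space (kw : List Char) (h0 : kw ≠ []) (hsp : ' ' ∉ kw) :
    ∀ (ps : List (List Char)),
      PySem.Chars.isIn kw (PySem.Chars.join [' '] ps) = ps.any (fun p => PySem.Chars.isIn kw p) := by
  intro ps
  induction ps with
  | nil =>
    have hj : PySem.Chars.join [' '] ([] : List (List Char)) = [] := by
      simp [PySem.Chars.join, List.intercalate]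
    rw [hj, List.any_nil]
    exact (PySem.Chars.isIn_eq_false_iff _ _).mpr (fun h => h0 (List.infix_nil.mp h))
  | cons p rest ih =>
    cases rest with
    | nil => simp [PySem.Chars.join_singleton]
    | cons q rest' =>
      rw [PySem.Chars.join_cons_cons]
      have : p ++ [' '] ++ PySem.Chars.join [' '] (q :: rest')
           = p ++ ' ' :: PySem.Chars.join [' '] (q :: rest') := by simp
      rw [this]
      rcases Bool.eq_false_or_eq_true (PySem.Chars.isIn kw (p ++ ' ' :: PySem.Chars.join [' '] (q :: rest'))) with hT | hF
      · rw [hT]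
        have hi := (PySem.Chars.isIn_iff_infix _ _).mp hT
        rw [infix_append_space kw h0 hsp] at hi
        symm
        simp only [List.any_cons, ← ih]
        rcases hi with h1 | h2
        · rw [(PySem.Chars.isIn_iff_infix _ _).mpr h1]; rfl
        · rw [(PySem.Chars.isIn_iff_infix _ _).mpr h2]; simp
      · rw [hF]
        have hni := (PySem.Chars.isIn_eq_false_iff _ _).mp hF
        rw [infix_append_space kw h0 hsp] at hni
        rw [not_or] at hni
        have h1 : PySem.Chars.isIn kw p = false :=
          (PySem.Chars.isIn_eq_false_iff _ _).mpr hni.1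
        have h2 : PySem.Chars.isIn kw (PySem.Chars.join [' '] (q :: rest')) = false :=
          (PySem.Chars.isIn_eq_false_iff _ _).mpr hni.2
        rw [ih] at h2
        simp only [List.any_cons] at h2 ⊢
        simp [h1, h2]

-- lower distributes over a " "-join.
lemma lower_append (a b : List Char) :
    PySem.Chars.lower (a ++ b) = PySem.Chars.lower a ++ PySem.Chars.lower b := by
  simp [PySem.Chars.lower]

lemma lower_join_space (ps : List (List Char)) :
    PySem.Chars.lower (PySem.Chars.join [' '] ps) = PySem.Chars.join [' '] (ps.map PySem.Chars.lower) := by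
  induction ps with
  | nil => simp [PySem.Chars.join, PySem.Chars.lower, List.intercalate]
  | cons p rest ih =>
    cases rest with
    | nil => simp [PySem.Chars.join_singleton]
    | cons q rest' =>
      simp only [List.map_cons] at *
      rw [PySem.Chars.join_cons_cons, PySem.Chars.join_cons_cons, lower_append, lower_append, ih]
      have hsp : PySem.Chars.lower [' '] = [' '] := by decide
      rw [hsp]

-- A's membership test in the lowered joined haystack = the per-token any-test.
lemma isIn_lower_join (kw : String) (h0 : kw.toList ≠ []) (hsp : ' ' ∉ kw.toList) (ts : List String) :
    PySem.Str.isIn kw (PySem.Str.lower (PySem.Str.join " " ts))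
      = ts.any (fun t => PySem.Str.isIn kw (PySem.Str.lower t)) := by
  rw [PySem.Str.isIn_eq, PySem.Str.toList_lower, PySem.Str.toList_join]
  have hsep : (" " : String).toList = [' '] := by decide
  rw [hsep, lower_join_space, isIn_join_space kw.toList h0 hsp, List.map_map, List.any_map]
  simp only [Function.comp_def, PySem.Str.isIn_eq, PySem.Str.toList_lower]

-- The four category booleans of a token list (per lowered token).
def pvF (ts : List String) : Bool := ts.any (fun t => PySem.Str.isIn "file" (PySem.Str.lower t) || PySem.Str.isIn "cat" (PySem.Str.lower t) || PySem.Str.isIn "ls" (PySem.Str.lower t))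
def pvG (ts : List String) : Bool := ts.any (fun t => PySem.Str.isIn "git" (PySem.Str.lower t))
def pvO (ts : List String) : Bool := ts.any (fun t => PySem.Str.isIn "open" (PySem.Str.lower t) || PySem.Str.isIn "close" (PySem.Str.lower t))
def pvN (ts : List String) : Bool := ts.any (fun t => PySem.Str.isIn "network" (PySem.Str.lower t) || PySem.Str.isIn "wifi" (PySem.Str.lower t))

def pvT (ts : List String) : Nat :=
  if pvF ts then 0 else if pvG ts then 1 else if pvO ts then 2 else if pvN ts then 3 else 4

lemma tokprio_eq (t : String) :
    pvTokenPriority (PySem.Str.lower t) pvKwPrio = pvT [t] := by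
  simp only [pvKwPrio, pvTokenPriority, pvT, pvF, pvG, pvO, pvN, List.any_cons, List.any_nil,
    Bool.or_false]
  cases h1 : PySem.Str.isIn "file" (PySem.Str.lower t) <;>
  cases h2 : PySem.Str.isIn "cat" (PySem.Str.lower t) <;>
  cases h3 : PySem.Str.isIn "ls" (PySem.Str.lower t) <;>
  cases h4 : PySem.Str.isIn "git" (PySem.Str.lower t) <;>
  cases h5 : PySem.Str.isIn "open" (PySem.Str.lower t) <;>
  cases h6 : PySem.Str.isIn "close" (PySem.Str.lower t) <;>
  cases h7 : PySem.Str.isIn "network" (PySem.Str.lower t) <;>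
  cases h8 : PySem.Str.isIn "wifi" (PySem.Str.lower t) <;>
  (try simp only [h1, h2, h3, h4, h5, h6, h7, h8]) <;> decide

lemma pvT_le_four (ts : List String) : pvT ts ≤ 4 := by
  unfold pvT; split_ifs <;> omega

lemma pvT_cons (t : String) (ts : List String) :
    pvT (t :: ts) = min (pvT [t]) (pvT ts) := by
  simp only [pvT, pvF, pvG, pvO, pvN, List.any_cons, List.any_nil, Bool.or_false]
  rcases Bool.eq_false_or_eq_true (PySem.Str.isIn "file" (PySem.Str.lower t) || PySem.Str.isIn "cat" (PySem.Str.lower t) || PySem.Str.isIn "ls" (PySem.Str.lower t)) with h1 | h1 <;>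
  rcases Bool.eq_false_or_eq_true (PySem.Str.isIn "git" (PySem.Str.lower t)) with h2 | h2 <;>
  rcases Bool.eq_false_or_eq_true (PySem.Str.isIn "open" (PySem.Str.lower t) || PySem.Str.isIn "close" (PySem.Str.lower t)) with h3 | h3 <;>
  rcases Bool.eq_false_or_eq_true (PySem.Str.isIn "network" (PySem.Str.lower t) || PySem.Str.isIn "wifi" (PySem.Str.lower t)) with h4 | h4 <;>
  rcases Bool.eq_false_or_eq_true (ts.any fun t => PySem.Str.isIn "file" (PySem.Str.lower t) || PySem.Str.isIn "cat" (PySem.Str.lower t) || PySem.Str.isIn "ls" (PySem.Str.lower t)) with hF | hF <;>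
  rcases Bool.eq_false_or_eq_true (ts.any fun t => PySem.Str.isIn "git" (PySem.Str.lower t)) with hG | hG <;>
  rcases Bool.eq_false_or_eq_true (ts.any fun t => PySem.Str.isIn "open" (PySem.Str.lower t) || PySem.Str.isIn "close" (PySem.Str.lower t)) with hO | hO <;>
  rcases Bool.eq_false_or_eq_true (ts.any fun t => PySem.Str.isIn "network" (PySem.Str.lower t) || PySem.Str.isIn "wifi" (PySem.Str.lower t)) with hN | hN <;>
  (try simp only [h1, h2, h3, h4, hF, hG, hO, hN]) <;> decide

-- Running-minimum fold characterisation.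
lemma fold_eq (ts : List String) : ∀ b : Nat, b ≤ 4 →
    ts.foldl (fun best t =>
      let p := pvTokenPriority (PySem.Str.lower t) pvKwPrio
      if p < best then p else best) b = min b (pvT ts) := by
  induction ts with
  | nil =>
    intro b hb
    have : pvT [] = 4 := by simp [pvT, pvF, pvG, pvO, pvN]
    simp [this]; omega
  | cons t ts ih =>
    intro b hb
    simp only [List.foldl_cons]
    have hstep : (if pvTokenPriority (PySem.Str.lower t) pvKwPrio < b then pvTokenPriority (PySem.Str.lower t) pvKwPrio else b) = min b (pvT [t]) := by
      rw [tokprio_eq]; split_ifs <;> omega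
    rw [hstep, ih _ (by have := pvT_le_four [t]; omega), pvT_cons t ts]
    omega

-- any distributes over a pointwise disjunction.
lemma any_or_split {A : Type} (l : List A) (p q : A → Bool) :
    (l.any fun x => p x || q x) = (l.any p || l.any q) := by
  induction l with
  | nil => rfl
  | cons a l ih =>
    simp only [List.any_cons, ih]
    cases p a <;> cases q a <;> cases l.any p <;> cases l.any q <;> rfl

-- ===== VERDICT (by name: the statement is the Claim_ definition above) =====
theorem identify_target_module_py_spec : Claim_equal_identify_target_module_py := by
  intro error_type data _
  unfold Spec_identify_target_module_py identify_target_module_py identify_target_module_py_alt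
  generalize PySem.Dict.getD (PySem.Dict.mk data) "triggers" [] = ts
  simp only [fold_eq ts 4 (le_refl 4),
    isIn_lower_join "file" (by decide) (by decide) ts,
    isIn_lower_join "cat" (by decide) (by decide) ts,
    isIn_lower_join "ls" (by decide) (by decide) ts,
    isIn_lower_join "git" (by decide) (by decide) ts,
    isIn_lower_join "open" (by decide) (by decide) ts,
    isIn_lower_join "close" (by decide) (by decide) ts,
    isIn_lower_join "network" (by decide) (by decide) ts,
    isIn_lower_join "wifi" (by decide) (by decide) ts]
  have h4 : min 4 (pvT ts) = pvT ts := by have := pvT_le_four ts; omega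
  rw [h4]
  simp only [← any_or_split]
  unfold pvT pvF pvG pvO pvN pvModules
  rcases Bool.eq_false_or_eq_true (ts.any fun t => PySem.Str.isIn "file" (PySem.Str.lower t) || PySem.Str.isIn "cat" (PySem.Str.lower t) || PySem.Str.isIn "ls" (PySem.Str.lower t)) with hF | hF <;>
  rcases Bool.eq_false_or_eq_true (ts.any fun t => PySem.Str.isIn "git" (PySem.Str.lower t)) with hG | hG <;>
  rcases Bool.eq_false_or_eq_true (ts.any fun t => PySem.Str.isIn "open" (PySem.Str.lower t) || PySem.Str.isIn "close" (PySem.Str.lower t)) with hO | hO <;>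
  rcases Bool.eq_false_or_eq_true (ts.any fun t => PySem.Str.isIn "network" (PySem.Str.lower t) || PySem.Str.isIn "wifi" (PySem.Str.lower t)) with hN | hN <;>
  (try simp only [hF, hG, hO, hN]) <;> decide
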